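-- pv_equiv track=rewrite | github.com/KieranMcFarlane/panther_chat | apps/signal-noise-app/run_perplexity_first_rfp_system.py | calculate_fit_score
-- ===== SOURCE A (Python) =====
-- from typing import Dict, List, Any, Optional, Tuple
--
-- def calculate_fit_score(opportunity: Dict[str, Any], entity: Dict[str, Any]) -> int:
--     """Phase 4: Enhanced Fit Scoring Algorithm"""
--     title = opportunity.get("title", "").lower()
--     opportunity_type = opportunity.get("type", "").lower()
--     entity_type = entity.get("type", "")
--     entity_name = entity.get("name", "")
--
--     base_score = 0
--
--     # Service Alignment (50% weight)
--     if any(term in title for term in ["mobile app", "mobile application", "ios", "android"]):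
--         base_score += 50
--     elif any(term in title for term in ["digital transformation", "digital platform", "digital ecosystem"]):
--         base_score += 50
--     elif any(term in title for term in ["web platform", "web development", "website", "portal"]):
--         base_score += 40
--     elif any(term in title for term in ["fan engagement", "fan experience", "fan platform"]):
--         base_score += 45
--     elif any(term in title for term in ["ticketing", "ticket system", "booking"]):
--         base_score += 35
--     elif any(term in title for term in ["analytics", "data platform", "insights", "dashboard"]):
--         base_score += 30
--     elif any(term in title for term in ["streaming", "ott", "video platform", "broadcast"]):
--         base_score += 40
--
--     # Project Scope Match (30% weight)
--     if any(term in title for term in ["end-to-end", "full lifecycle", "complete solution"]):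
--         base_score += 30
--     elif any(term in title for term in ["strategic partnership", "long-term", "multi-year"]):
--         base_score += 25
--     elif any(term in title for term in ["implementation", "deployment", "support"]):
--         base_score += 25
--     elif any(term in title for term in ["integration", "api", "connect"]):
--         base_score += 20
--     elif "consulting" in title:
--         base_score += 10
--
--     # Yellow Panther Differentiators (20% weight)
--     if "sport" in title or "sport" in entity_name.lower():
--         base_score += 10
--     if entity_type == "Federation":
--         base_score += 8
--     elif entity_type == "League":
--         base_score += 8
--     elif entity_type == "Club":
--         base_score += 6
--     if any(term in title for term in ["iso", "certification", "compliant", "award"]):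
--         base_score += 5
--     if any(term in title for term in ["uk", "british", "english", "european", "london"]):
--         base_score += 4
--
--     # Cap at 100
--     return min(base_score, 100)
-- ===== SOURCE B (Python) =====
-- # Different structure: all title keywords live in ONE flat (term, group, points) index;
-- # the title is matched against it in a single filtering pass, then each group's score is
-- # the points of its first hit in the match list (no per-group short-circuit ladders).
--
-- GROUPED = [
--     (0, [(["mobile app", "mobile application", "ios", "android"], 50),
--          (["digital transformation", "digital platform", "digital ecosystem"], 50),
--          (["web platform", "web development", "website", "portal"], 40),
--          (["fan engagement", "fan experience", "fan platform"], 45),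
--          (["ticketing", "ticket system", "booking"], 35),
--          (["analytics", "data platform", "insights", "dashboard"], 30),
--          (["streaming", "ott", "video platform", "broadcast"], 40)]),
--     (1, [(["end-to-end", "full lifecycle", "complete solution"], 30),
--          (["strategic partnership", "long-term", "multi-year"], 25),
--          (["implementation", "deployment", "support"], 25),
--          (["integration", "api", "connect"], 20),
--          (["consulting"], 10)]),
--     (2, [(["iso", "certification", "compliant", "award"], 5)]),
--     (3, [(["uk", "british", "english", "european", "london"], 4)]),
-- ]
--
-- # flat keyword index, in rule order
-- FLAT_RULES = [(term, g, pts) for g, rules in GROUPED for terms, pts in rules for term in terms]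
--
--
-- def calculate_fit_score(opportunity, entity):
--     title = opportunity.get("title", "").lower()
--     entity_type = entity.get("type", "")
--     entity_name = entity.get("name", "")
--
--     # one pass over the flat index: every keyword hit, tagged with its group and points
--     matched = [(g, pts) for term, g, pts in FLAT_RULES if term in title]
--
--     # each group contributes the points of its first hit (0 if none)
--     score = 0
--     for g, _ in GROUPED:
--         score += next((pts for gg, pts in matched if gg == g), 0)
--
--     if "sport" in title or "sport" in entity_name.lower():
--         score += 10
--     score += {"Federation": 8, "League": 8, "Club": 6}.get(entity_type, 0)
--
--     return min(score, 100)
-- ===== Notes on version B (the rewrite author's own statement) =====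
-- stated objective: alternative
-- what changed: All title keywords are flattened into one (term, group, points) index matched against the title in a single filtering pass; each group's contribution is then the points of its first hit in that match list, replacing A's per-group short-circuit if/elif ladders; the entity-type elif becomes a dict lookup.
import Mathlib
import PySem

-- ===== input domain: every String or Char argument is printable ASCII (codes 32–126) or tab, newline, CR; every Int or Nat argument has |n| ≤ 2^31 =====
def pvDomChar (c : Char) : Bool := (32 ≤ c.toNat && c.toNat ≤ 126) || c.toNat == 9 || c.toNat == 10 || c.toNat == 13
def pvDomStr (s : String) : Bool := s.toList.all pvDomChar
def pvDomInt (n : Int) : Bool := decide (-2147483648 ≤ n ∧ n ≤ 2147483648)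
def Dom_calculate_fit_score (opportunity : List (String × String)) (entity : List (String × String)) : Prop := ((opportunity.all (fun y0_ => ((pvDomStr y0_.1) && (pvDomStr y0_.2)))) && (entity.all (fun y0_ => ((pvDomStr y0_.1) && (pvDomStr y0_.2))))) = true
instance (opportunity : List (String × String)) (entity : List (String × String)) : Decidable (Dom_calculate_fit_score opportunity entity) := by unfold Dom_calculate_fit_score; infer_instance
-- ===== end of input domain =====

-- B flattens all title keywords into one (term, group, points) index, matches the title
-- against it in a single filtering pass, and scores each group by its first hit in the
-- match list, instead of A's per-group short-circuit if/elif ladders (objective: alternative).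

-- ===== PORT A =====
-- literal transliteration of A's if/elif ladders
def calculate_fit_score (opportunity : List (String × String)) (entity : List (String × String)) : Int :=
  let title := PySem.Str.lower ((PySem.Dict.mk opportunity).getD "title" "")
  let _opportunity_type := PySem.Str.lower ((PySem.Dict.mk opportunity).getD "type" "")
  let entity_type := (PySem.Dict.mk entity).getD "type" ""
  let entity_name := (PySem.Dict.mk entity).getD "name" ""
  let base_score : Int := 0
  -- Service Alignment (50% weight)
  let base_score :=
    if ["mobile app", "mobile application", "ios", "android"].any (fun t => PySem.Str.isIn t title) then base_score + 50
    else if ["digital transformation", "digital platform", "digital ecosystem"].any (fun t => PySem.Str.isIn t title) then base_score + 50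
    else if ["web platform", "web development", "website", "portal"].any (fun t => PySem.Str.isIn t title) then base_score + 40
    else if ["fan engagement", "fan experience", "fan platform"].any (fun t => PySem.Str.isIn t title) then base_score + 45
    else if ["ticketing", "ticket system", "booking"].any (fun t => PySem.Str.isIn t title) then base_score + 35
    else if ["analytics", "data platform", "insights", "dashboard"].any (fun t => PySem.Str.isIn t title) then base_score + 30
    else if ["streaming", "ott", "video platform", "broadcast"].any (fun t => PySem.Str.isIn t title) then base_score + 40
    else base_score
  -- Project Scope Match (30% weight)
  let base_score :=
    if ["end-to-end", "full lifecycle", "complete solution"].any (fun t => PySem.Str.isIn t title) then base_score + 30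
    else if ["strategic partnership", "long-term", "multi-year"].any (fun t => PySem.Str.isIn t title) then base_score + 25
    else if ["implementation", "deployment", "support"].any (fun t => PySem.Str.isIn t title) then base_score + 25
    else if ["integration", "api", "connect"].any (fun t => PySem.Str.isIn t title) then base_score + 20
    else if PySem.Str.isIn "consulting" title then base_score + 10
    else base_score
  -- Yellow Panther Differentiators (20% weight)
  let base_score :=
    if PySem.Str.isIn "sport" title || PySem.Str.isIn "sport" (PySem.Str.lower entity_name) then base_score + 10
    else base_score
  let base_score :=
    if entity_type == "Federation" then base_score + 8
    else if entity_type == "League" then base_score + 8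
    else if entity_type == "Club" then base_score + 6
    else base_score
  let base_score :=
    if ["iso", "certification", "compliant", "award"].any (fun t => PySem.Str.isIn t title) then base_score + 5
    else base_score
  let base_score :=
    if ["uk", "british", "english", "european", "london"].any (fun t => PySem.Str.isIn t title) then base_score + 4
    else base_score
  min base_score 100

-- ===== PORT B =====
def groupedRules : List (Int × List (List String × Int)) :=
  [(0, [(["mobile app", "mobile application", "ios", "android"], 50),
        (["digital transformation", "digital platform", "digital ecosystem"], 50),
        (["web platform", "web development", "website", "portal"], 40),
        (["fan engagement", "fan experience", "fan platform"], 45),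
        (["ticketing", "ticket system", "booking"], 35),
        (["analytics", "data platform", "insights", "dashboard"], 30),
        (["streaming", "ott", "video platform", "broadcast"], 40)]),
   (1, [(["end-to-end", "full lifecycle", "complete solution"], 30),
        (["strategic partnership", "long-term", "multi-year"], 25),
        (["implementation", "deployment", "support"], 25),
        (["integration", "api", "connect"], 20),
        (["consulting"], 10)]),
   (2, [(["iso", "certification", "compliant", "award"], 5)]),
   (3, [(["uk", "british", "english", "european", "london"], 4)])]

-- FLAT_RULES = [(term, g, pts) for g, rules in GROUPED for terms, pts in rules for term in terms]
def flatRules : List (String × Int × Int) :=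
  groupedRules.flatMap (fun gr => gr.2.flatMap (fun rp => rp.1.map (fun s => (s, gr.1, rp.2))))

def typePoints : PySem.Dict String Int :=
  PySem.Dict.mk [("Federation", 8), ("League", 8), ("Club", 6)]

def calculate_fit_score_alt (opportunity : List (String × String)) (entity : List (String × String)) : Int :=
  let title := PySem.Str.lower ((PySem.Dict.mk opportunity).getD "title" "")
  let entity_type := (PySem.Dict.mk entity).getD "type" ""
  let entity_name := (PySem.Dict.mk entity).getD "name" ""
  -- matched = [(g, pts) for term, g, pts in FLAT_RULES if term in title]
  let matched := (flatRules.filter (fun r => PySem.Str.isIn r.1 title)).map (fun r => r.2)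
  -- for g, _ in GROUPED: score += next((pts for gg, pts in matched if gg == g), 0)
  let score := groupedRules.foldl
    (fun s gr => s + (((matched.find? (fun x => x.1 == gr.1)).map Prod.snd).getD 0)) 0
  let score :=
    if PySem.Str.isIn "sport" title || PySem.Str.isIn "sport" (PySem.Str.lower entity_name) then score + 10
    else score
  let score := score + typePoints.getD entity_type 0
  min score 100

-- ===== PRECONDITION & SPEC =====
def Spec_calculate_fit_score (opportunity : List (String × String)) (entity : List (String × String)) (out : Int) : Prop := out = calculate_fit_score_alt opportunity entity
instance (opportunity : List (String × String)) (entity : List (String × String)) (out : Int) : Decidable (Spec_calculate_fit_score opportunity entity out) := by unfold Spec_calculate_fit_score; infer_instance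

-- ===== CLAIM (what is proved, stated in full; the proofs are below) =====
def Claim_equal_calculate_fit_score : Prop := ∀ (opportunity : List (String × String)) (entity : List (String × String)), Dom_calculate_fit_score opportunity entity → Spec_calculate_fit_score opportunity entity (calculate_fit_score opportunity entity)

-- ===== LEMMAS AND PROOFS =====

-- group g's contribution computed from a flat keyword index l (proof-only helper)
def Gscore (t : String) (g : Int) (l : List (String × Int × Int)) : Int :=
  ((((l.filter (fun r => PySem.Str.isIn r.1 t)).map (fun r => r.2)).find? (fun x => x.1 == g)).map Prod.snd).getD 0

theorem Gscore_nil (t : String) (g : Int) : Gscore t g [] = 0 := rfl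

theorem Gscore_chunk (t : String) (g g' v : Int) (terms : List String) (l₂ : List (String × Int × Int)) :
    Gscore t g ((terms.map (fun s => (s, g', v))) ++ l₂)
      = if g' == g && terms.any (fun s => PySem.Str.isIn s t) then v else Gscore t g l₂ := by
  induction terms with
  | nil => simp [Gscore]
  | cons s rest ih =>
    simp only [List.map_cons, List.cons_append]
    show Gscore t g ((s, g', v) :: (rest.map (fun s => (s, g', v)) ++ l₂)) = _
    unfold Gscore
    rw [List.filter_cons]
    cases h : PySem.Str.isIn s t
    · simp only [h, Bool.false_eq_true, if_false, List.any_cons, Bool.false_or]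
      exact ih
    · simp only [if_true, List.map_cons]
      cases hg : ((g' : Int) == g)
      · rw [List.find?_cons_of_neg (by simp [hg])]
        simp only [List.any_cons, Bool.false_and]
        simpa only [Gscore, hg, Bool.false_and, if_false] using ih
      · rw [List.find?_cons_of_pos (by simp [hg])]
        have h' : PySem.Chars.isIn s.toList t.toList = true := by simpa using h
        simp [List.any_cons, h']

theorem typePoints_getD (t : String) :
    typePoints.getD t 0 =
      if t == "Federation" then 8 else if t == "League" then 8 else if t == "Club" then 6 else 0 := by
  by_cases h1 : t = "Federation"
  · subst h1; decide
  · by_cases h2 : t = "League"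
    · subst h2; decide
    · by_cases h3 : t = "Club"
      · subst h3; decide
      · have e1 : (("Federation" : String) == t) = false := by
          rw [beq_eq_false_iff_ne]; exact fun h => h1 h.symm
        have e2 : (("League" : String) == t) = false := by
          rw [beq_eq_false_iff_ne]; exact fun h => h2 h.symm
        have e3 : (("Club" : String) == t) = false := by
          rw [beq_eq_false_iff_ne]; exact fun h => h3 h.symm
        simp [typePoints, PySem.Dict.getD_eq_get?_getD, PySem.Dict.get?, List.find?,
          e1, e2, e3, h1, h2, h3]

-- flatRules written as right-nested appends of per-rule keyword chunks
theorem flat_chunks : flatRules =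
    ((["mobile app", "mobile application", "ios", "android"].map (fun s => (s, (0:Int), (50:Int)))) ++
    ((["digital transformation", "digital platform", "digital ecosystem"].map (fun s => (s, (0:Int), (50:Int)))) ++
    ((["web platform", "web development", "website", "portal"].map (fun s => (s, (0:Int), (40:Int)))) ++
    ((["fan engagement", "fan experience", "fan platform"].map (fun s => (s, (0:Int), (45:Int)))) ++
    ((["ticketing", "ticket system", "booking"].map (fun s => (s, (0:Int), (35:Int)))) ++
    ((["analytics", "data platform", "insights", "dashboard"].map (fun s => (s, (0:Int), (30:Int)))) ++
    ((["streaming", "ott", "video platform", "broadcast"].map (fun s => (s, (0:Int), (40:Int)))) ++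
    ((["end-to-end", "full lifecycle", "complete solution"].map (fun s => (s, (1:Int), (30:Int)))) ++
    ((["strategic partnership", "long-term", "multi-year"].map (fun s => (s, (1:Int), (25:Int)))) ++
    ((["implementation", "deployment", "support"].map (fun s => (s, (1:Int), (25:Int)))) ++
    ((["integration", "api", "connect"].map (fun s => (s, (1:Int), (20:Int)))) ++
    ((["consulting"].map (fun s => (s, (1:Int), (10:Int)))) ++
    ((["iso", "certification", "compliant", "award"].map (fun s => (s, (2:Int), (5:Int)))) ++
    ((["uk", "british", "english", "european", "london"].map (fun s => (s, (3:Int), (4:Int)))) ++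
    ([] : List (String × Int × Int)))))))))))))))) := by rfl

theorem ladA (a1 a2 a3 a4 a5 a6 a7 : Bool) (s : Int) :
    (if a1 then s + 50 else if a2 then s + 50 else if a3 then s + 40
      else if a4 then s + 45 else if a5 then s + 35 else if a6 then s + 30
      else if a7 then s + 40 else s)
    = s + (if a1 then 50 else if a2 then 50 else if a3 then 40
      else if a4 then 45 else if a5 then 35 else if a6 then 30 else if a7 then 40 else 0) := by
  split_ifs <;> omega

theorem ladB (b1 b2 b3 b4 b5 : Bool) (s : Int) :
    (if b1 then s + 30 else if b2 then s + 25 else if b3 then s + 25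
      else if b4 then s + 20 else if b5 then s + 10 else s)
    = s + (if b1 then 30 else if b2 then 25 else if b3 then 25
      else if b4 then 20 else if b5 then 10 else 0) := by
  split_ifs <;> omega

theorem ladT (t : String) (s : Int) :
    (if t == "Federation" then s + 8 else if t == "League" then s + 8
      else if t == "Club" then s + 6 else s)
    = s + typePoints.getD t 0 := by
  rw [typePoints_getD]; split_ifs <;> omega

theorem ladd (c : Bool) (a s : Int) :
    (if c then s + a else s) = s + (if c then a else 0) := by
  split_ifs <;> omega

-- the four group scores over the flat index, as A's rule-level ladders
theorem G0 (t : String) : Gscore t 0 flatRules =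
    (if ["mobile app", "mobile application", "ios", "android"].any (fun s => PySem.Str.isIn s t) then 50
     else if ["digital transformation", "digital platform", "digital ecosystem"].any (fun s => PySem.Str.isIn s t) then 50
     else if ["web platform", "web development", "website", "portal"].any (fun s => PySem.Str.isIn s t) then 40
     else if ["fan engagement", "fan experience", "fan platform"].any (fun s => PySem.Str.isIn s t) then 45
     else if ["ticketing", "ticket system", "booking"].any (fun s => PySem.Str.isIn s t) then 35
     else if ["analytics", "data platform", "insights", "dashboard"].any (fun s => PySem.Str.isIn s t) then 30
     else if ["streaming", "ott", "video platform", "broadcast"].any (fun s => PySem.Str.isIn s t) then 40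
     else 0) := by
  rw [flat_chunks]
  simp only [Gscore_chunk, Gscore_nil]
  norm_num

theorem G1 (t : String) : Gscore t 1 flatRules =
    (if ["end-to-end", "full lifecycle", "complete solution"].any (fun s => PySem.Str.isIn s t) then 30
     else if ["strategic partnership", "long-term", "multi-year"].any (fun s => PySem.Str.isIn s t) then 25
     else if ["implementation", "deployment", "support"].any (fun s => PySem.Str.isIn s t) then 25
     else if ["integration", "api", "connect"].any (fun s => PySem.Str.isIn s t) then 20
     else if PySem.Str.isIn "consulting" t then 10
     else 0) := by
  rw [flat_chunks]
  simp only [Gscore_chunk, Gscore_nil]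
  norm_num
  rfl

theorem G2 (t : String) : Gscore t 2 flatRules =
    (if ["iso", "certification", "compliant", "award"].any (fun s => PySem.Str.isIn s t) then 5 else 0) := by
  rw [flat_chunks]
  simp only [Gscore_chunk, Gscore_nil]
  norm_num

theorem G3 (t : String) : Gscore t 3 flatRules =
    (if ["uk", "british", "english", "european", "london"].any (fun s => PySem.Str.isIn s t) then 4 else 0) := by
  rw [flat_chunks]
  simp only [Gscore_chunk, Gscore_nil]
  norm_num

set_option maxHeartbeats 1600000 in
theorem calculate_fit_score_eq_alt (opportunity entity : List (String × String)) :
    calculate_fit_score opportunity entity = calculate_fit_score_alt opportunity entity := by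
  unfold calculate_fit_score calculate_fit_score_alt
  generalize PySem.Str.lower ((PySem.Dict.mk opportunity).getD "title" "") = title
  generalize (PySem.Dict.mk entity).getD "type" "" = entity_type
  generalize (PySem.Dict.mk entity).getD "name" "" = entity_name
  have hfold : groupedRules.foldl
      (fun s gr => s + (((((flatRules.filter (fun r => PySem.Str.isIn r.1 title)).map
        (fun r => r.2)).find? (fun x => x.1 == gr.1)).map Prod.snd).getD 0)) 0
      = Gscore title 0 flatRules + Gscore title 1 flatRules
        + Gscore title 2 flatRules + Gscore title 3 flatRules := by
    simp [groupedRules, Gscore]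
  simp only []
  rw [hfold, G0, G1, G2, G3]
  rw [ladd, ladd, ladT, ladd, ladB, ladA, ladd]
  ring_nf

-- ===== VERDICT (by name: the statement is the Claim_ definition above) =====
theorem calculate_fit_score_spec : Claim_equal_calculate_fit_score := by
  intro opportunity entity _
  unfold Spec_calculate_fit_score
  exact calculate_fit_score_eq_alt opportunity entity
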